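-- pv_equiv track=rewrite | github.com/SpangeWenkies/solana-market-simulator | main.py | build_message_header
-- ===== SOURCE A (Python) =====
-- from typing import Any
--
-- def build_message_header(accounts: list[dict[str, Any]]) -> dict[str, int]:
--     # A transaction message is the signable payload of a Solana transaction:
--     # header + account keys + recent_blockhash + compiled instructions,
--     # and for v0 messages also address table lookups.
--     return {
--         "num_required_signatures": sum(1 for account in accounts if account["is_signer"]),
--         "num_readonly_signed_accounts": sum(
--             1 for account in accounts if account["is_signer"] and not account["is_writable"]
--         ),
--         "num_readonly_unsigned_accounts": sum(
--             1 for account in accounts if not account["is_signer"] and not account["is_writable"]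
--         ),
--     }
-- ===== SOURCE B (Python) =====
-- def build_message_header(accounts):
--     # One tabulation pass over (is_signer, is_writable) categories, then
--     # derive the three header fields by arithmetic on the table.
--     cats = {}
--     for account in accounts:
--         key = (bool(account["is_signer"]), bool(account["is_writable"]))
--         cats[key] = cats.get(key, 0) + 1
--     signed_writable = cats.get((True, True), 0)
--     signed_readonly = cats.get((True, False), 0)
--     unsigned_readonly = cats.get((False, False), 0)
--     return {
--         "num_required_signatures": signed_writable + signed_readonly,
--         "num_readonly_signed_accounts": signed_readonly,
--         "num_readonly_unsigned_accounts": unsigned_readonly,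
--     }
-- ===== Notes on version B (the rewrite author's own statement) =====
-- stated objective: alternative
-- what changed: Replaces A's three separate generator scans over the account list by a single tabulation pass building a frequency table keyed by (is_signer, is_writable), from which the three header fields are derived arithmetically.
import Mathlib
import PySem

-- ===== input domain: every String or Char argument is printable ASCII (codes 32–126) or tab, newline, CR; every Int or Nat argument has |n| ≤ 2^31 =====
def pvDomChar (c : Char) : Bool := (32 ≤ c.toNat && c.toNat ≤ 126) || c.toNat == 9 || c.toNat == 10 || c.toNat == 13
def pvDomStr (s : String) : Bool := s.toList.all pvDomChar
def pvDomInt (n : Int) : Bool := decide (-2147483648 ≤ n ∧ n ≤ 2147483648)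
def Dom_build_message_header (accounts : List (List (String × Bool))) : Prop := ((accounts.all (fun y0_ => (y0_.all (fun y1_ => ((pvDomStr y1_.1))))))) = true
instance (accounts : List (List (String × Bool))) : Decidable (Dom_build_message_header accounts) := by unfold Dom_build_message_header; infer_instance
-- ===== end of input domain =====

-- B replaces A's three separate scans by one tabulation pass over (is_signer, is_writable)
-- categories plus arithmetic on the table (objective: alternative decomposition).


-- ===== PORT A =====
-- account[k]: dict lookup, first match; none = KeyError, excluded by Pre_ (getD false unreachable inside Pre_)
def aGet (a : List (String × Bool)) (k : String) : Bool :=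
  ((PySem.Dict.mk a).get? k).getD false

def build_message_header (accounts : List (List (String × Bool))) : List (String × Int) :=
  [("num_required_signatures",
      accounts.foldl (fun s a => if aGet a "is_signer" then s + 1 else s) (0 : Int)),
   ("num_readonly_signed_accounts",
      accounts.foldl (fun s a => if aGet a "is_signer" && !aGet a "is_writable" then s + 1 else s) (0 : Int)),
   ("num_readonly_unsigned_accounts",
      accounts.foldl (fun s a => if !aGet a "is_signer" && !aGet a "is_writable" then s + 1 else s) (0 : Int))]

-- ===== PORT B =====
-- key = (bool(account["is_signer"]), bool(account["is_writable"])); bool() on a Bool is the identity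
def bCat (a : List (String × Bool)) : Bool × Bool :=
  (((PySem.Dict.mk a).get? "is_signer").getD false, ((PySem.Dict.mk a).get? "is_writable").getD false)

def build_message_header_alt (accounts : List (List (String × Bool))) : List (String × Int) :=
  let cats : PySem.Dict (Bool × Bool) Int :=
    accounts.foldl (fun d a => d.insert (bCat a) (d.getD (bCat a) 0 + 1)) PySem.Dict.empty
  let signed_writable := cats.getD (true, true) 0
  let signed_readonly := cats.getD (true, false) 0
  let unsigned_readonly := cats.getD (false, false) 0
  [("num_required_signatures", signed_writable + signed_readonly),
   ("num_readonly_signed_accounts", signed_readonly),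
   ("num_readonly_unsigned_accounts", unsigned_readonly)]

-- ===== PRECONDITION & SPEC =====
-- Pre_ excludes exactly the inputs where Python A raises KeyError: an account missing
-- the "is_signer" or "is_writable" key (A reads both keys of every account).
def Pre_build_message_header (accounts : List (List (String × Bool))) : Prop :=
  ∀ a ∈ accounts, (PySem.Dict.mk a).contains "is_signer" = true ∧ (PySem.Dict.mk a).contains "is_writable" = true
instance (accounts : List (List (String × Bool))) : Decidable (Pre_build_message_header accounts) := by unfold Pre_build_message_header; infer_instance

def pvWitness_build_message_header : (List (List (String × Bool))) :=
  []

def Spec_build_message_header (accounts : List (List (String × Bool))) (out : List (String × Int)) : Prop := out = build_message_header_alt accounts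
instance (accounts : List (List (String × Bool))) (out : List (String × Int)) : Decidable (Spec_build_message_header accounts out) := by unfold Spec_build_message_header; infer_instance

-- ===== CLAIM (what is proved, stated in full; the proofs are below) =====
def Claim_equal_build_message_header : Prop := ∀ (accounts : List (List (String × Bool))), Dom_build_message_header accounts → Pre_build_message_header accounts → Spec_build_message_header accounts (build_message_header accounts)

-- ===== LEMMAS AND PROOFS =====

-- A's generator sums: a conditional foldl counts the satisfying elements
lemma foldl_count_if {α : Type} (p : α → Bool) (l : List α) (s : Int) :
    l.foldl (fun s a => if p a then s + 1 else s) s = s + (l.countP p : Int) := by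
  induction l generalizing s with
  | nil => simp
  | cons x xs ih => by_cases h : p x <;> simp [List.countP_cons, h, ih] <;> push_cast <;> ring

-- B's table lookup is a count of category occurrences
lemma cats_getD_gen (l : List (List (String × Bool))) (d : PySem.Dict (Bool × Bool) Int) (v : Bool × Bool) :
    (l.foldl (fun d a => d.insert (bCat a) (d.getD (bCat a) 0 + 1)) d).getD v 0
      = d.getD v 0 + ((l.countP (fun a => bCat a == v) : Nat) : Int) := by
  induction l generalizing d with
  | nil => simp
  | cons x xs ih =>
    rw [List.foldl_cons, ih, List.countP_cons, PySem.Dict.getD_insert]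
    by_cases h : v = bCat x
    · simp only [h, if_pos rfl, beq_self_eq_true, if_pos]
      push_cast; ring
    · have hb : (bCat x == v) = false := by
        simp only [beq_eq_false_iff_ne, ne_eq]; exact fun hc => h hc.symm
      simp [h, hb]

lemma cats_getD (accounts : List (List (String × Bool))) (k : Bool × Bool) :
    (accounts.foldl (fun d a => d.insert (bCat a) (d.getD (bCat a) 0 + 1)) PySem.Dict.empty).getD k 0
      = ((accounts.countP (fun a => bCat a == k) : Nat) : Int) := by
  rw [cats_getD_gen, PySem.Dict.getD_empty, zero_add]

theorem build_message_header_spec : Claim_equal_build_message_header := by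
  intro accounts hdom hpre
  clear hdom hpre
  unfold Spec_build_message_header build_message_header build_message_header_alt
  simp only [cats_getD, foldl_count_if, zero_add]
  have h1 : accounts.countP (fun a => aGet a "is_signer")
      = accounts.countP (fun a => bCat a == (true, true)) + accounts.countP (fun a => bCat a == (true, false)) := by
    induction accounts with
    | nil => rfl
    | cons x xs ih =>
      simp only [List.countP_cons, bCat, aGet] at ih ⊢
      cases hs : ((PySem.Dict.mk x).get? "is_signer").getD false <;>
        cases hw : ((PySem.Dict.mk x).get? "is_writable").getD false <;> simp_all <;> omega
  have h2 : accounts.countP (fun a => aGet a "is_signer" && !aGet a "is_writable")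
      = accounts.countP (fun a => bCat a == (true, false)) := by
    apply List.countP_congr; intro a _
    simp only [bCat, aGet]
    cases ((PySem.Dict.mk a).get? "is_signer").getD false <;>
      cases ((PySem.Dict.mk a).get? "is_writable").getD false <;> simp
  have h3 : accounts.countP (fun a => !aGet a "is_signer" && !aGet a "is_writable")
      = accounts.countP (fun a => bCat a == (false, false)) := by
    apply List.countP_congr; intro a _
    simp only [bCat, aGet]
    cases ((PySem.Dict.mk a).get? "is_signer").getD false <;>
      cases ((PySem.Dict.mk a).get? "is_writable").getD false <;> simp
  rw [h1, h2, h3]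
  push_cast; ring_nf
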